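-- pv_equiv track=rewrite | github.com/fungs/taxator-tk | taxator-tk_extended/bin/taxatortk.py | extract_gi_from_identifier
-- ===== SOURCE A (Python) =====
-- def extract_gi_from_identifier(string):
--     """extracts the GI number from a NCBI-style fasta header"""
--     try:
--         target_id = string.replace('|', ' ').split()
--         for i in range(0, len(target_id)):
--             if target_id[i][-2:] == 'gi':
--                 return target_id[i + 1]
--     except IndexError:
--         pass
--     return None
-- ===== SOURCE B (Python) =====
-- def extract_gi_from_identifier(string):
--     """extracts the GI number from a NCBI-style fasta header"""
--     capture = False
--     cur = ''
--     for ch in string.replace('|', ' '):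
--         if ch.isspace():
--             if cur:
--                 if capture:
--                     return cur
--                 capture = cur.endswith('gi')
--                 cur = ''
--         else:
--             cur += ch
--     return cur if cur and capture else None
-- ===== Notes on version B (the rewrite author's own statement) =====
-- stated objective: alternative
-- what changed: B never builds a token list: it runs a single character-level state machine over the header (accumulating the current word and a 'previous word ended in gi' flag) and returns the word completed right after a gi-word, instead of A's split-into-tokens plus indexed scan with try/except IndexError.
import Mathlib
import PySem

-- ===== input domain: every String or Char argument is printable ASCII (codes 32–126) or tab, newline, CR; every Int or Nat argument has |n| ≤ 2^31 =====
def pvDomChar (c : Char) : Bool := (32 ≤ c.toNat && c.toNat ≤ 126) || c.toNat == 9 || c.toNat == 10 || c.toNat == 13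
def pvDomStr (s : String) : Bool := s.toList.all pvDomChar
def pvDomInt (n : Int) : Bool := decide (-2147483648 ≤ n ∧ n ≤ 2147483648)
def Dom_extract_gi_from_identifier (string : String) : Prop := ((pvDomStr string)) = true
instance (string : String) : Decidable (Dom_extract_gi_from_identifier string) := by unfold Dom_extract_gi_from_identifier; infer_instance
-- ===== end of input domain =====

-- B replaces A's split-into-tokens plus indexed scan (with try/except IndexError) by a single
-- character-level state machine that never materialises a token list: an alternative decomposition.

-- ===== PORT A =====
-- A's for-loop over range(0, len(target_id)); an IndexError on target_id[i + 1] is caught and yields None (pyGet? = none there).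
def pvLoopA (ts : List String) (i : Nat) : Option String :=
  if i < ts.length then
    match PySem.List.pyGet? ts (i : Int) with
    | none => none
    | some t =>
      if PySem.Str.slice t (some (-2)) none = "gi" then
        PySem.List.pyGet? ts ((i : Int) + 1)
      else pvLoopA ts (i + 1)
  else none
termination_by ts.length - i

def extract_gi_from_identifier (string : String) : Option String :=
  let target_id := PySem.Str.split₀ (PySem.Str.replace string "|" " ")
  pvLoopA target_id 0

-- ===== PORT B =====
-- B's for-loop over the characters of string.replace('|', ' '), with state (capture, cur);
-- the early 'return cur' makes the loop an Option-valued recursion.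
def pvScanB : List Char → Bool → List Char → Option String
  | [], cap, cur => if cur.isEmpty then none else if cap then some (String.ofList cur) else none
  | c :: rest, cap, cur =>
    if PySem.Chars.isspace c then
      if cur.isEmpty then pvScanB rest cap cur
      else if cap then some (String.ofList cur)
      else pvScanB rest (PySem.Chars.endswith cur ['g', 'i']) []
    else pvScanB rest cap (cur ++ [c])

def extract_gi_from_identifier_alt (string : String) : Option String :=
  pvScanB (PySem.Str.replace string "|" " ").toList false []

-- ===== PRECONDITION & SPEC =====
def Spec_extract_gi_from_identifier (string : String) (out : Option String) : Prop := out = extract_gi_from_identifier_alt string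
instance (string : String) (out : Option String) : Decidable (Spec_extract_gi_from_identifier string out) := by unfold Spec_extract_gi_from_identifier; infer_instance

-- ===== CLAIM (what is proved, stated in full; the proofs are below) =====
def Claim_equal_extract_gi_from_identifier : Prop := ∀ (string : String), Dom_extract_gi_from_identifier string → Spec_extract_gi_from_identifier string (extract_gi_from_identifier string)

-- ===== LEMMAS AND PROOFS =====

-- Common token-level description: scan the token list carrying a flag 'previous token ended in gi'.
def pvTokS : Bool → List String → Option String
  | _, [] => none
  | true, t :: _ => some t
  | false, t :: rest => pvTokS (PySem.Str.endswith t "gi") rest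

def pvTokC : Bool → List (List Char) → Option String
  | _, [] => none
  | true, t :: _ => some (String.ofList t)
  | false, t :: rest => pvTokC (PySem.Chars.endswith t ['g', 'i']) rest

-- t[-2:] == 'gi' is exactly t.endswith('gi')
theorem cond_eq (t : String) :
    (PySem.Str.slice t (some (-2)) none = "gi") ↔ PySem.Str.endswith t "gi" = true := by
  rw [String.ext_iff]
  simp [PySem.Chars.endswith_iff]
  rw [PySem.List.slice_from_neg_ofNat _ 2 (by omega)]
  constructor
  · intro h; exact h ▸ List.drop_suffix _ _
  · intro h
    rw [List.suffix_iff_eq_drop] at h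
    simpa using h.symm

-- A's indexed loop from position i is the token-level scan of the remaining tokens
theorem loopA_eq (ts : List String) (i : Nat) :
    pvLoopA ts i = pvTokS false (ts.drop i) := by
  rw [pvLoopA]
  by_cases h : i < ts.length
  · have hd : ts.drop i = ts[i] :: ts.drop (i + 1) := List.drop_eq_getElem_cons h
    simp only [h, if_true, PySem.List.pyGet?_natCast, List.getElem?_eq_getElem h]
    by_cases hc : PySem.Str.slice ts[i] (some (-2)) none = "gi"
    · rw [if_pos hc]
      have hc' : PySem.Str.endswith ts[i] "gi" = true := (cond_eq ts[i]).mp hc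
      have hcast : ((i : Int) + 1) = ((i + 1 : Nat) : Int) := by push_cast; ring
      rw [hcast, PySem.List.pyGet?_natCast]
      cases hr : ts.drop (i + 1) with
      | nil =>
        have hlen : ts.length ≤ i + 1 := by
          have := congrArg List.length hr; simp at this; omega
        rw [List.getElem?_eq_none hlen]
        simp [hd, hr, pvTokS]
      | cons r rs =>
        have hget : ts[i+1]? = some r := by
          have := congrArg (·[0]?) hr; simpa using this
        rw [hget]
        have hc'' : PySem.Chars.endswith ts[i].toList ['g', 'i'] = true := by
          simpa using hc'
        simp [hd, hr, pvTokS, hc'']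
    · rw [if_neg hc]
      have hc' : PySem.Str.endswith ts[i] "gi" = false := by
        rw [Bool.eq_false_iff]; intro hb; exact hc ((cond_eq ts[i]).mpr hb)
      rw [loopA_eq ts (i + 1), hd,
        show pvTokS false (ts[i] :: List.drop (i + 1) ts)
            = pvTokS (PySem.Str.endswith ts[i] "gi") (List.drop (i + 1) ts) from rfl,
        hc']
  · have : ts.drop i = [] := List.drop_eq_nil_of_le (by omega)
    simp [h, this, pvTokS]
termination_by ts.length - i

-- split₀.go's accumulator just prepends already-finished tokens
theorem go_acc (cs : List Char) (cur : List Char) (acc : List (List Char)) :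
    PySem.Chars.split₀.go cs cur acc = acc.reverse ++ PySem.Chars.split₀.go cs cur [] := by
  induction cs generalizing cur acc with
  | nil =>
    by_cases hcur : cur.isEmpty
    · simp [PySem.Chars.split₀.go, hcur]
    · simp [PySem.Chars.split₀.go, hcur]
  | cons c rest ih =>
    by_cases hs : PySem.Chars.isspace c
    · by_cases hcur : cur.isEmpty
      · simp only [PySem.Chars.split₀.go, hs, hcur, if_true]
        exact ih [] acc
      · simp only [PySem.Chars.split₀.go, hs, hcur, if_true, if_false, Bool.false_eq_true]
        rw [ih [] (cur.reverse :: acc), ih [] [cur.reverse]]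
        simp
    · simp only [PySem.Chars.split₀.go, hs, Bool.false_eq_true, if_false]
      exact ih (c :: cur) acc

-- B's character state machine computes the token-level scan of the tokens still to be produced
theorem scanB_eq (cs : List Char) (cap : Bool) (cur : List Char) :
    pvScanB cs cap cur = pvTokC cap (PySem.Chars.split₀.go cs cur.reverse []) := by
  induction cs generalizing cap cur with
  | nil =>
    by_cases hcur : cur.isEmpty
    · have : cur = [] := by simpa [List.isEmpty_iff] using hcur
      simp [pvScanB, PySem.Chars.split₀.go, this, pvTokC]
    · have hrev : cur.reverse.isEmpty = false := by
        simp [List.isEmpty_iff] at hcur ⊢; exact hcur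
      cases cap with
      | true => simp [pvScanB, PySem.Chars.split₀.go, hcur, hrev, pvTokC]
      | false => simp [pvScanB, PySem.Chars.split₀.go, hcur, hrev, pvTokC]
  | cons c rest ih =>
    by_cases hs : PySem.Chars.isspace c
    · by_cases hcur : cur.isEmpty
      · have hnil : cur = [] := by simpa [List.isEmpty_iff] using hcur
        subst hnil
        simpa [pvScanB, PySem.Chars.split₀.go, hs] using ih cap []
      · have hrev : cur.reverse.isEmpty = false := by
          simp [List.isEmpty_iff] at hcur ⊢; exact hcur
        have hgo : PySem.Chars.split₀.go (c :: rest) cur.reverse [] =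
            cur :: PySem.Chars.split₀.go rest [] [] := by
          simp only [PySem.Chars.split₀.go, hs, hrev, if_true, Bool.false_eq_true, if_false]
          rw [go_acc rest [] [cur.reverse.reverse]]
          simp
        rw [hgo]
        cases cap with
        | true => simp [pvScanB, hs, hcur, pvTokC]
        | false =>
          simp only [pvScanB, hs, hcur, Bool.false_eq_true, if_false, if_true, pvTokC]
          have := ih (PySem.Chars.endswith cur ['g', 'i']) []
          simpa using this
    · simp only [pvScanB, hs, Bool.false_eq_true, if_false]
      rw [ih cap (cur ++ [c])]
      simp [PySem.Chars.split₀.go, hs]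

-- the two token-level scans agree
theorem tok_eq (toks : List (List Char)) (cap : Bool) :
    pvTokC cap toks = pvTokS cap (toks.map String.ofList) := by
  induction toks generalizing cap with
  | nil => cases cap <;> simp [pvTokC, pvTokS]
  | cons t rest ih =>
    cases cap with
    | true => simp [pvTokC, pvTokS]
    | false =>
      simp only [pvTokC, pvTokS, List.map]
      rw [ih]
      congr 1
      simp [PySem.Str.endswith]

-- ===== VERDICT (by name: the statement is the Claim_ definition above) =====
theorem extract_gi_from_identifier_spec : Claim_equal_extract_gi_from_identifier := by
  intro s _
  unfold Spec_extract_gi_from_identifier extract_gi_from_identifier extract_gi_from_identifier_alt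
  rw [loopA_eq, scanB_eq]
  simp only [List.drop_zero, List.reverse_nil]
  rw [tok_eq]
  rfl
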